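-- pv_equiv track=rewrite | github.com/arpitjain799/case-conversion | case_conversion/utils.py | _segment_string
-- ===== SOURCE A (Python) =====
-- import unicodedata
-- from typing import cast, Any, Iterator, List, Optional, Tuple, Union
--
-- def _char_is_sep(a_char: str) -> bool:
--     return not (
--         _char_is_upper(a_char) or _char_is_lower(a_char) or _char_is_decimal(a_char)
--     )
--
-- def _char_is_decimal(a_char: str) -> bool:
--     return unicodedata.category(a_char) == "Nd"
--
-- def _char_is_lower(a_char: str) -> bool:
--     return unicodedata.category(a_char) == "Ll"
--
-- def _char_is_upper(a_char: str) -> bool: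
--     return unicodedata.category(a_char) == "Lu"
--
-- def _segment_string(string: str) -> Tuple[List[Optional[str]], str, bool]:
--     """Segment string on separator into list of words.
--
--     Arguments:
--         string -- the string we want to process
--     Returns:
--         words -- list of words the string got minced to
--         separator -- the separator char intersecting words
--         was_upper -- whether string happened to be upper-case
--     """
--     words: List[Optional[str]] = []
--     separator = ""
--
--     # curr_index of current character. Initially 1 because we don't
--     # want to check if the 0th character is a boundary.
--     curr_i = 1
--     # Index of first character in a sequence
--     seq_i = 0
--     # Previous character.
--     prev_i = string[0:1]
--
--     # Treat an all-caps stringiable as lower-case, to prevent its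
--     # letters to be counted as boundaries
--     was_upper = False
--     if string.isupper():
--         string = string.lower()
--         was_upper = True
--
--     # Iterate over each character, checking for boundaries, or places
--     # where the stringiable should divided.
--     while curr_i <= len(string):
--         char = string[curr_i : curr_i + 1]
--         split = False
--         if curr_i < len(string):
--             # Detect upper-case letter as boundary.
--             if _char_is_upper(char):
--                 split = True
--             # Detect transition from separator to not separator.
--             elif not _char_is_sep(char) and _char_is_sep(prev_i):
--                 split = True
--             # Detect transition not separator to separator.
--             elif _char_is_sep(char) and not _char_is_sep(prev_i):
--                 split = True
--         else:
--             # The looprev_igoes one extra iteration so that it can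
--             # handle the remaining text after the last boundary.
--             split = True
--
--         if split:
--             if not _char_is_sep(prev_i):
--                 words.append(string[seq_i:curr_i])
--             else:
--                 # stringiable contains at least one separator.
--                 # Use the first one as the stringiable's primary separator.
--                 if not separator:
--                     separator = string[seq_i : seq_i + 1]
--
--                 # Use None to indicate a separator in the word list.
--                 words.append(None)
--                 # If separators weren't included in the list, then breaks
--                 # between upper-case sequences ("AAA_BBB") would be
--                 # disregarded; the letter-run detector would count them
--                 # as a single sequence ("AAABBB").
--             seq_i = curr_i
--
--         curr_i += 1
--         prev_i = char
--
--     return words, separator, was_upper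
-- ===== SOURCE B (Python) =====
-- # B: run-based segmentation — consume maximal separator runs / word runs in one
-- # outer loop instead of A's per-character boundary detection with prev/seq state.
-- import unicodedata
--
--
-- def _char_is_sep(a_char: str) -> bool:
--     return not (
--         _char_is_upper(a_char) or _char_is_lower(a_char) or _char_is_decimal(a_char)
--     )
--
--
-- def _char_is_decimal(a_char: str) -> bool:
--     return unicodedata.category(a_char) == "Nd"
--
--
-- def _char_is_lower(a_char: str) -> bool:
--     return unicodedata.category(a_char) == "Ll"
--
--
-- def _char_is_upper(a_char: str) -> bool:
--     return unicodedata.category(a_char) == "Lu"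
--
--
-- def _segment_string(string):
--     if not string:
--         return [], "", False
--     was_upper = string.isupper()
--     if was_upper:
--         string = string.lower()
--     words = []
--     separator = ""
--     i = 0
--     n = len(string)
--     while i < n:
--         c = string[i]
--         j = i + 1
--         if _char_is_sep(c):
--             # maximal separator run -> one None; first run's first char names the separator
--             while j < n and _char_is_sep(string[j]):
--                 j += 1
--             if not separator:
--                 separator = c
--             words.append(None)
--         else:
--             # maximal word run: non-separators, stopping before any upper-case letter
--             while j < n and not _char_is_sep(string[j]) and not _char_is_upper(string[j]):
--                 j += 1
--             words.append(string[i:j])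
--         i = j
--     return words, separator, was_upper
-- ===== Notes on version B (the rewrite author's own statement) =====
-- stated objective: alternative
-- what changed: A scans character by character with prev/seq/split boundary state and one extra loop iteration past the end; B consumes one maximal separator run or word run per outer-loop iteration (inner scans), appending None or the run slice directly and taking the separator from the first separator run.
import Mathlib
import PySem

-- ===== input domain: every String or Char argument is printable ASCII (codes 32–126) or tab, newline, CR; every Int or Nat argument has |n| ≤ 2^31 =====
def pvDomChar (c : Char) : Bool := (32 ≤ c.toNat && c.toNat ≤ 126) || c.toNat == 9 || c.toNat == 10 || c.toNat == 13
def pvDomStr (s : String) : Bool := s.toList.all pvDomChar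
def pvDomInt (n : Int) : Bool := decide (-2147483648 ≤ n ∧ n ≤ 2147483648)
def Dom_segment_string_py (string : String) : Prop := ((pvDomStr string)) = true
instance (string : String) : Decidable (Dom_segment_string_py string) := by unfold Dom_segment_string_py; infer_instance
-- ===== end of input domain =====

-- B replaces A's per-character boundary scan (prev/seq/split state) with an outer loop that
-- consumes one maximal separator run or word run per iteration (objective: alternative decomposition).

-- ===== PORT A =====
-- unicodedata.category(c) == 'Lu' / 'Ll' / 'Nd': on the ASCII input domain these are
-- exactly the ranges A-Z / a-z / 0-9, i.e. PySem.Chars.isupper / islower / isdigit.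
def pvIsUpper (c : Char) : Bool := PySem.Chars.isupper c
def pvIsLower (c : Char) : Bool := PySem.Chars.islower c
def pvIsDecimal (c : Char) : Bool := PySem.Chars.isdigit c
def pvIsSep (c : Char) : Bool := !(pvIsUpper c || pvIsLower c || pvIsDecimal c)

-- A hands length-≤1 string slices to its char helpers; on '' category() would raise
-- TypeError, but A never reaches a helper call on '' (the '_ => false' arms are unreachable).

def pvUpperL (a : List Char) : Bool := match a with | [c] => pvIsUpper c | _ => false
def pvSepL (a : List Char) : Bool := match a with | [c] => pvIsSep c | _ => false

-- str.isupper(): at least one cased character and no lower-case one (exact on ASCII,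
-- where the cased characters are the letters); shared by both ports, as in the Python.
def pvStrIsUpper (cs : List Char) : Bool := cs.any PySem.Chars.isupper && cs.all (fun c => !PySem.Chars.islower c)

-- the while loop of _segment_string; state = (curr_i, seq_i, prev_i, words, separator)
def segGo (s : List Char) (curr_i seq_i : Nat) (prev : List Char)
    (words : List (Option String)) (sep : String) : List (Option String) × String :=
  if h : curr_i ≤ s.length then
    let ch := PySem.List.slice s (some (curr_i : Int)) (some ((curr_i : Int) + 1))
    let split : Bool :=
      if curr_i < s.length then
        if pvUpperL ch then true
        else if !pvSepL ch && pvSepL prev then true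
        else if pvSepL ch && !pvSepL prev then true
        else false
      else true
    let st :=
      if split then
        if !pvSepL prev then
          (words ++ [some (String.ofList (PySem.List.slice s (some (seq_i : Int)) (some (curr_i : Int))))], sep, curr_i)
        else
          ((words ++ [none] : List (Option String)),
           if sep = "" then String.ofList (PySem.List.slice s (some (seq_i : Int)) (some ((seq_i : Int) + 1))) else sep,
           curr_i)
      else (words, sep, seq_i)
    segGo s (curr_i + 1) st.2.2 ch st.1 st.2.1
  else (words, sep)
termination_by s.length + 1 - curr_i
decreasing_by omega

def segment_string_py (string : String) : List (Option String) × String × Bool :=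
  let s0 := string.toList
  let prev0 := PySem.List.slice s0 (some 0) (some 1)
  let was_upper := pvStrIsUpper s0
  let s := if was_upper then PySem.Chars.lower s0 else s0
  let r := segGo s 1 0 prev0 [] ""
  (r.1, r.2, was_upper)

-- ===== PORT B =====
def pvWordChar (c : Char) : Bool := !pvIsSep c && !pvIsUpper c
def altGo (cs : List Char) : List (Option String) × Option Char :=
  match cs with
  | [] => ([], none)
  | c :: rest =>
    if pvIsSep c then
      let res := altGo (rest.dropWhile pvIsSep)
      (none :: res.1, some c)
    else
      let res := altGo (rest.dropWhile pvWordChar)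
      (some (String.ofList (c :: rest.takeWhile pvWordChar)) :: res.1, res.2)
termination_by cs.length
decreasing_by
  · have := List.length_dropWhile_le pvIsSep rest; simpa using Nat.lt_succ_of_le this
  · have := List.length_dropWhile_le pvWordChar rest; simpa using Nat.lt_succ_of_le this

def segment_string_py_alt (string : String) : List (Option String) × String × Bool :=
  let cs := string.toList
  if cs.isEmpty then ([], "", false)
  else
    let was_upper := pvStrIsUpper cs
    let cs' := if was_upper then PySem.Chars.lower cs else cs
    let res := altGo cs'
    (res.1, (res.2.map fun c => String.ofList [c]).getD "", was_upper)

-- ===== PRECONDITION & SPEC =====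
def Spec_segment_string_py (string : String) (out : List (Option String) × String × Bool) : Prop := out = segment_string_py_alt string
instance (string : String) (out : List (Option String) × String × Bool) : Decidable (Spec_segment_string_py string out) := by unfold Spec_segment_string_py; infer_instance

-- ===== CLAIM (what is proved, stated in full; the proofs are below) =====
def Claim_equal_segment_string_py : Prop := ∀ (string : String), Dom_segment_string_py string → Spec_segment_string_py string (segment_string_py string)

-- ===== LEMMAS AND PROOFS =====

-- how A threads `separator`: keep it if already set, else take the run char B reports
def pvCombine (sep : String) (o : Option Char) : String :=
  if sep = "" then (o.map fun c => String.ofList [c]).getD "" else sep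

theorem pvCombine_of_ne (sep : String) (o : Option Char) (h : sep ≠ "") : pvCombine sep o = sep := by
  simp [pvCombine, h]

theorem pvSep_not_upper (c : Char) (h : pvIsSep c = true) : pvIsUpper c = false := by
  simp [pvIsSep] at h; simp [h.1]

theorem pvDropWhile_eq_drop {α} (p : α → Bool) (l : List α) : l.dropWhile p = l.drop (l.takeWhile p).length := by
  calc l.dropWhile p = List.drop (l.takeWhile p).length (l.takeWhile p ++ l.dropWhile p) := List.drop_left.symm
    _ = l.drop (l.takeWhile p).length := by rw [List.takeWhile_append_dropWhile]
theorem pvTakeWhile_get {α} (p : α → Bool) (l : List α) (j : Nat) (hj : j < (l.takeWhile p).length) (hl : j < l.length) : p l[j] = true := by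
  apply List.mem_takeWhile_imp (l := l)
  rw [List.prefix_iff_eq_take.mp (List.takeWhile_prefix p)]
  rw [List.prefix_iff_eq_take.mp (List.takeWhile_prefix p)] at hj
  exact (List.getElem_take ▸ List.getElem_mem (by simpa using hj))
theorem pvTakeWhile_boundary {α} (p : α → Bool) (l : List α) (h : (l.takeWhile p).length < l.length) : p (l[(l.takeWhile p).length]) = false := by
  have h2 := List.head?_dropWhile_not p l
  rw [pvDropWhile_eq_drop, List.head?_drop, List.getElem?_eq_getElem h] at h2
  exact h2
theorem pvOfList_ne_empty (c : Char) (l : List Char) : String.ofList (c :: l) ≠ "" := by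
  intro h
  have := congrArg String.toList h
  simp at this

theorem pvDropGet (s : List Char) (a j i : Nat) (hij : a + j = i) (hj : j < (s.drop a).length)
    (hi : i < s.length) : (s.drop a)[j] = s[i] := by subst hij; exact List.getElem_drop

theorem slice_one (s : List Char) (k : Nat) (hk : k < s.length) :
    PySem.List.slice s (some (k : Int)) (some ((k : Int) + 1)) = [s[k]] := by
  have h := PySem.List.slice_natCast_add s k 1
  simp at h
  rw [h]
  exact List.take_one_drop_eq_of_lt_length hk

-- segGo reads prev only through pvSepL
theorem segGo_prev_congr (s : List Char) (c q : Nat) (prev prev' : List Char)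
    (ws : List (Option String)) (sep : String) (hp : pvSepL prev = pvSepL prev') :
    segGo s c q prev ws sep = segGo s c q prev' ws sep := by
  conv_lhs => rw [segGo]
  conv_rhs => rw [segGo]
  rw [hp]

-- no boundary is detected inside a run: advance past t same-run characters
theorem segGo_run_advance (s : List Char) :
    ∀ t i q ws sep (hit : i + t < s.length) (hi : i < s.length),
      (∀ r (_ : 1 ≤ r) (_ : r ≤ t) (hr : i + r < s.length),
        pvIsUpper s[i + r] = false ∧ pvIsSep s[i + r] = pvIsSep s[i]) →
      segGo s (i + 1) q [s[i]] ws sep = segGo s (i + t + 1) q [s[i + t]] ws sep := by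
  intro t
  induction t with
  | zero => intro i q ws sep _ _ _; rfl
  | succ n ih =>
    intro i q ws sep hit hi hrun
    have hlt : i + 1 < s.length := by omega
    have hstep : segGo s (i + 1) q [s[i]] ws sep = segGo s (i + 2) q [s[i + 1]] ws sep := by
      obtain ⟨hu, hs⟩ := hrun 1 (le_refl 1) (by omega) hlt
      rw [segGo]
      rw [dif_pos (by omega : i + 1 ≤ s.length)]
      simp only [slice_one s (i + 1) hlt, pvUpperL, pvSepL, hu, hs, if_pos hlt]
      simp [Bool.not_and_self, Bool.and_not_self]
    rw [hstep]
    have e1 : i + 2 = (i + 1) + 1 := by omega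
    have e2 : i + (n + 1) + 1 = (i + 1) + n + 1 := by omega
    have e3 : s[i + (n+1)] = s[(i+1) + n]'(by omega) := by congr 1; omega
    rw [e1, e2, e3]
    apply ih (i + 1) q ws sep (by omega) hlt
    intro r h1 h2 hr
    obtain ⟨hu, hs⟩ := hrun (r + 1) (by omega) (by omega) (by omega : i + (r+1) < s.length)
    constructor
    · have : s[(i+1) + r]'hr = s[i + (r+1)]'(by omega) := by congr 1; omega
      rw [this]; exact hu
    · have h4 : s[(i+1) + r]'hr = s[i + (r+1)]'(by omega) := by congr 1; omega
      obtain ⟨hu1, hs1⟩ := hrun 1 (le_refl 1) (by omega) hlt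
      rw [h4, hs, ← hs1]

-- the main correspondence: from a run start k, A's remaining loop emits exactly B's runs
theorem segGo_runs (s : List Char) :
    ∀ fuel k ws sep, s.length - k ≤ fuel → (hk : k < s.length) →
      segGo s (k + 1) k [s[k]] ws sep
        = (ws ++ (altGo (s.drop k)).1, pvCombine sep (altGo (s.drop k)).2) := by
  intro fuel
  induction fuel with
  | zero => intro k ws sep hf hk; omega
  | succ n ih =>
    intro k ws sep hf hk
    have hdk : s.drop k = s[k] :: s.drop (k + 1) := List.drop_eq_getElem_cons hk
    have hdlen : (s.drop (k + 1)).length = s.length - (k + 1) := List.length_drop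
    by_cases hP : pvIsSep s[k] = true
    · -- separator run
      obtain ⟨m, hm⟩ : ∃ m, (List.takeWhile pvIsSep (s.drop (k + 1))).length = m := ⟨_, rfl⟩
      have hmle : m ≤ (s.drop (k + 1)).length := hm ▸ (List.takeWhile_prefix pvIsSep).length_le
      have hkm : k + m < s.length := by omega
      have hrunsep : ∀ r (hr : k + r < s.length), 1 ≤ r → r ≤ m → pvIsSep s[k + r] = true := by
        intro r hr h1 h2
        have hj : r - 1 < (s.drop (k + 1)).length := by omega
        have t1 : pvIsSep ((s.drop (k + 1))[r - 1]) = true :=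
          pvTakeWhile_get pvIsSep _ (r - 1) (by omega) hj
        have t2 : (s.drop (k + 1))[r - 1] = s[k + r] := pvDropGet s (k + 1) (r - 1) (k + r) (by omega) hj hr
        rw [← t2]; exact t1
      have hadv := segGo_run_advance s m k k ws sep hkm hk (by
        intro r h1 h2 hr
        have hs := hrunsep r hr h1 h2
        exact ⟨pvSep_not_upper _ hs, by rw [hs, hP]⟩)
      rw [hadv]
      have hskm : pvIsSep s[k + m] = true := by
        rcases Nat.eq_zero_or_pos m with h0 | h0
        · simpa [h0] using hP
        · exact hrunsep m hkm h0 (le_refl m)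
      have hdw : List.dropWhile pvIsSep (s.drop (k + 1)) = s.drop (k + m + 1) := by
        rw [pvDropWhile_eq_drop, hm, List.drop_drop]
        rw [show k + 1 + m = k + m + 1 by omega]
      have haltk : altGo (s.drop k) = (none :: (altGo (s.drop (k + m + 1))).1, some s[k]) := by
        rw [hdk, altGo]
        simp only [hP, if_pos, hdw]
      rw [segGo]
      rw [dif_pos (by omega : k + m + 1 ≤ s.length)]
      by_cases he : k + m + 1 < s.length
      · have hPe : pvIsSep s[k + m + 1] = false := by
          have hb := pvTakeWhile_boundary pvIsSep (s.drop (k + 1)) (by omega)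
          have t2 : (s.drop (k + 1))[(List.takeWhile pvIsSep (s.drop (k + 1))).length]'(by omega)
              = s[k + m + 1] := pvDropGet s (k + 1) _ (k + m + 1) (by omega) (by omega) he
          rw [← t2]; exact hb
        simp only [slice_one s (k + m + 1) he, slice_one s k hk, pvUpperL, pvSepL, hPe, hskm,
          if_pos he, Bool.not_false, Bool.not_true, Bool.and_true, Bool.and_false, ite_self,
          if_true]
        simp only [Bool.false_eq_true, if_false]
        rw [ih (k + m + 1) (ws ++ [none]) _ (by omega) he]
        rw [haltk]
        refine Prod.ext ?_ ?_
        · simp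
        · show pvCombine
            (if sep = "" then String.ofList [s[k]] else sep) (altGo (s.drop (k + m + 1))).2 = _
          by_cases hsep : sep = ""
          · rw [if_pos hsep, pvCombine_of_ne _ _ (pvOfList_ne_empty _ _)]
            simp [pvCombine, hsep]
          · rw [if_neg hsep, pvCombine_of_ne _ _ hsep, pvCombine_of_ne _ _ hsep]
      · have hnil : s.drop (k + m + 1) = [] := List.drop_eq_nil_of_le (by omega)
        have hnl : ¬ (k + m + 1 < s.length) := by omega
        simp only [if_neg hnl, slice_one s k hk, pvSepL, hskm, Bool.not_true, Bool.false_eq_true,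
          if_true, if_false]
        rw [segGo]
        rw [dif_neg (by omega : ¬ (k + m + 1 + 1 ≤ s.length))]
        rw [haltk, hnil]
        refine Prod.ext ?_ ?_
        · simp [altGo]
        · show (if sep = "" then String.ofList [s[k]] else sep) = pvCombine sep (some s[k])
          simp [pvCombine]
    · -- word run
      obtain ⟨m, hm⟩ : ∃ m, (List.takeWhile pvWordChar (s.drop (k + 1))).length = m := ⟨_, rfl⟩
      have hmle : m ≤ (s.drop (k + 1)).length := hm ▸ (List.takeWhile_prefix pvWordChar).length_le
      have hkm : k + m < s.length := by omega
      have hPk : pvIsSep s[k] = false := by simpa using hP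
      have hrunw : ∀ r (hr : k + r < s.length), 1 ≤ r → r ≤ m → pvWordChar s[k + r] = true := by
        intro r hr h1 h2
        have hj : r - 1 < (s.drop (k + 1)).length := by omega
        have t1 : pvWordChar ((s.drop (k + 1))[r - 1]) = true :=
          pvTakeWhile_get pvWordChar _ (r - 1) (by omega) hj
        have t2 : (s.drop (k + 1))[r - 1] = s[k + r] := pvDropGet s (k + 1) (r - 1) (k + r) (by omega) hj hr
        rw [← t2]; exact t1
      have hadv := segGo_run_advance s m k k ws sep hkm hk (by
        intro r h1 h2 hr
        have hw := hrunw r hr h1 h2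
        simp only [pvWordChar, Bool.and_eq_true, Bool.not_eq_true'] at hw
        exact ⟨hw.2, by rw [hw.1, hPk]⟩)
      rw [hadv]
      have hskm : pvIsSep s[k + m] = false := by
        rcases Nat.eq_zero_or_pos m with h0 | h0
        · simpa [h0] using hP
        · have := hrunw m hkm h0 (le_refl m)
          simp only [pvWordChar, Bool.and_eq_true, Bool.not_eq_true'] at this
          exact this.1
      have htw : List.takeWhile pvWordChar (s.drop (k + 1)) = (s.drop (k + 1)).take m := by
        conv_lhs => rw [List.prefix_iff_eq_take.mp (List.takeWhile_prefix pvWordChar)]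
        rw [hm]
      have hword : PySem.List.slice s (some (k : Int)) (some ((k + m + 1 : Nat) : Int))
          = s[k] :: List.takeWhile pvWordChar (s.drop (k + 1)) := by
        rw [PySem.List.slice_natCast s k (k + m + 1)]
        rw [hdk]
        rw [show k + m + 1 - k = m + 1 by omega, List.take_succ_cons, htw]
      have hdw : List.dropWhile pvWordChar (s.drop (k + 1)) = s.drop (k + m + 1) := by
        rw [pvDropWhile_eq_drop, hm, List.drop_drop]
        rw [show k + 1 + m = k + m + 1 by omega]
      have haltk : altGo (s.drop k)
          = (some (String.ofList (s[k] :: List.takeWhile pvWordChar (s.drop (k + 1)))) :: (altGo (s.drop (k + m + 1))).1,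
             (altGo (s.drop (k + m + 1))).2) := by
        rw [hdk, altGo]
        simp only [hP, Bool.false_eq_true, if_false, hdw]
      rw [segGo]
      rw [dif_pos (by omega : k + m + 1 ≤ s.length)]
      by_cases he : k + m + 1 < s.length
      · have hbe : pvWordChar s[k + m + 1] = false := by
          have hb := pvTakeWhile_boundary pvWordChar (s.drop (k + 1)) (by omega)
          have t2 : (s.drop (k + 1))[(List.takeWhile pvWordChar (s.drop (k + 1))).length]'(by omega)
              = s[k + m + 1] := pvDropGet s (k + 1) _ (k + m + 1) (by omega) (by omega) he
          rw [← t2]; exact hb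
        have hsplit : (if k + m + 1 < s.length then
            (if pvUpperL [s[k + m + 1]] = true then true
            else if (!pvSepL [s[k + m + 1]] && pvSepL [s[k + m]]) = true then true
            else if (pvSepL [s[k + m + 1]] && !pvSepL [s[k + m]]) = true then true else false)
            else true) = true := by
          rw [if_pos he]
          simp only [pvUpperL, pvSepL, hskm, Bool.not_false, Bool.and_true]
          simp only [pvWordChar] at hbe
          rcases Bool.eq_false_or_eq_true (pvIsUpper s[k + m + 1]) with hU | hU
          · simp [hU]
          · have h1 : pvIsSep s[k + m + 1] = true := by
              cases h3 : pvIsSep s[k + m + 1]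
              · cases h4 : pvIsUpper s[k + m + 1]
                · simp [h3, h4] at hbe
                · rw [hU] at h4; cases h4
              · rfl
            simp [hU, h1]
        simp only [slice_one s (k + m + 1) he]
        rw [hsplit]
        simp only [pvSepL, hskm, Bool.not_false, if_true]
        rw [ih (k + m + 1) _ _ (by omega) he]
        rw [haltk, hword]
        refine Prod.ext ?_ ?_
        · simp
        · rfl
      · have hnil : s.drop (k + m + 1) = [] := List.drop_eq_nil_of_le (by omega)
        have hnl : ¬ (k + m + 1 < s.length) := by omega
        simp only [if_neg hnl, pvSepL, hskm, Bool.not_false, if_true]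
        rw [segGo]
        rw [dif_neg (by omega : ¬ (k + m + 1 + 1 ≤ s.length))]
        rw [haltk, hword, hnil]
        refine Prod.ext ?_ ?_
        · simp [altGo]
        · show sep = pvCombine sep (altGo ([] : List Char)).2
          rw [altGo]
          simp [pvCombine]

theorem pvSep_lowerChar (c : Char) : pvIsSep (PySem.Chars.lowerChar c) = pvIsSep c := by
  simp only [pvIsSep, pvIsUpper, pvIsLower, pvIsDecimal]
  by_cases h : PySem.Chars.isupper c = true
  · have hc : 65 ≤ c.toNat ∧ c.toNat ≤ 90 := by
      simp [PySem.Chars.isupper, Char.le_def, UInt32.le_iff_toNat_le] at h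
      exact ⟨h.1, h.2⟩
    have hv : (Char.ofNat (c.toNat + 32)).toNat = c.toNat + 32 := by
      rw [Char.toNat_ofNat]
      have : (c.toNat + 32).isValidChar := by unfold Nat.isValidChar; omega
      simp [this]
    have ha : 'a'.val.toNat = 97 := rfl
    have hz : 'z'.val.toNat = 122 := rfl
    rw [Char.toNat] at hv
    have hlow : PySem.Chars.islower (Char.ofNat (c.toNat + 32)) = true := by
      simp only [PySem.Chars.islower, Char.le_def, UInt32.le_iff_toNat_le, hv, ha, hz,
        Bool.and_eq_true, decide_eq_true_eq]
      omega
    simp [PySem.Chars.lowerChar, h, hlow]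
  · simp [PySem.Chars.lowerChar, h]

theorem segGo_cons (c : Char) (t : List Char) (prev : List Char) (hp : pvSepL prev = pvIsSep c) :
    segGo (c :: t) 1 0 prev [] "" = ((altGo (c :: t)).1, pvCombine "" (altGo (c :: t)).2) := by
  have h := segGo_runs (c :: t) (c :: t).length 0 [] "" (by omega) (by simp)
  simp only [zero_add, List.getElem_cons_zero, List.drop_zero, List.nil_append] at h
  rw [← h]
  exact segGo_prev_congr _ _ _ _ _ _ _ (by rw [hp]; rfl)

theorem segment_string_main (string : String) :
    segment_string_py string = segment_string_py_alt string := by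
  unfold segment_string_py segment_string_py_alt
  cases hcs : string.toList with
  | nil =>
    simp [segGo, pvStrIsUpper, PySem.List.slice]
  | cons c t =>
    have hsl : PySem.List.slice (c :: t) (some 0) (some 1) = [c] := by
      have := PySem.List.slice_natCast_add (c :: t) 0 1
      simpa using this
    simp only [List.isEmpty_cons, Bool.false_eq_true, if_false, hsl]
    by_cases hU : pvStrIsUpper (c :: t) = true
    · have hlow : PySem.Chars.lower (c :: t)
          = PySem.Chars.lowerChar c :: List.map PySem.Chars.lowerChar t := by
        simp [PySem.Chars.lower]
      simp only [hU, if_true, hlow]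
      rw [segGo_cons _ _ [c] (by show pvIsSep c = _; rw [pvSep_lowerChar])]
      simp [pvCombine]
    · simp only [hU, Bool.false_eq_true, if_false]
      rw [segGo_cons _ _ [c] rfl]
      simp [pvCombine]

-- ===== VERDICT (by name: the statement is the Claim_ definition above) =====
theorem segment_string_py_spec : Claim_equal_segment_string_py := by
  intro string _
  exact segment_string_main string
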